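-- pv_equiv track=rewrite | github.com/Nikhilesh-B/CompetitiveProgrammingPractice | competitive programming questions/CULC/question5.py | calculate_val
-- ===== SOURCE A (Python) =====
-- def memoized_exponentation_calc(exponentations, n):
--     if n in exponentations:
--         val = exponentations[n]
--         return val
--     else:
--         val = memoized_exponentation_calc(exponentations=exponentations, n=n-1)
--         exponentations[n] = 2*val
--         return 2*val
--
-- def calculate_val(input_string):
--     n = len(input_string)
--     input_string = input_string[::-1]
--     running_sum = 0
--     exponentations = {0: 1}
--     for i, char in enumerate(input_string):
--         if char == "O":
--             if i not in exponentations: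
--                 val = memoized_exponentation_calc(exponentations, i)
--                 exponentations[i] = val
--             else:
--                 val = exponentations[i]
--             running_sum += (val)
--     return running_sum % (10**9+7)
-- ===== SOURCE B (Python) =====
-- def calculate_val(input_string):
--     if not input_string:
--         return 0
--     bits = ''.join('1' if c == 'O' else '0' for c in input_string)
--     return int(bits, 2) % (10**9 + 7)
-- ===== Notes on version B (the rewrite author's own statement) =====
-- stated objective: idiomatic
-- what changed: Replaces the reversed-string loop with a memoized-power dictionary by reading the string directly as a binary number ('O' = bit 1, leftmost char most significant) via int(bits, 2), then taking the modulus once.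
import Mathlib
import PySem

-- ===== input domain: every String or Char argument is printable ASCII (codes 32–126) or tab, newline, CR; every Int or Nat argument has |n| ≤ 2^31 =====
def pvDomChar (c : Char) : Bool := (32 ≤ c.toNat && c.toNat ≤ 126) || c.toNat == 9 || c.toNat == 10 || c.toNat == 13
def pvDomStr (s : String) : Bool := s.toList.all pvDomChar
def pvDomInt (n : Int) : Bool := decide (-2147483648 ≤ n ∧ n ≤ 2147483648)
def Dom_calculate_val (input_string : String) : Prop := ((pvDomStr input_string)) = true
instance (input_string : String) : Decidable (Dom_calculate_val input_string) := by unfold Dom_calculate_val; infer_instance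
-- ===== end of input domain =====

-- B reads the string directly as a binary number ('O' = 1, leftmost char most significant)
-- instead of A's reversed-string loop with a memoized-power dictionary; same cost, plainer.

-- ===== PORT A =====
-- Recursive memoized power helper of A. In A the recursion bottoms out at the key 0
-- (always present); `fuel` (= n.toNat at every call site) makes the same descent structural.
-- The fuel-exhausted value 0 is never reached on A's calls.
def memoized_exponentation_calc (exps : PySem.Dict Int Int) (n : Int) (fuel : Nat) :
    PySem.Dict Int Int × Int :=
  match exps.get? n with
  | some v => (exps, v)
  | none =>
    match fuel with
    | 0 => (exps, 0)
    | f + 1 =>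
      let r := memoized_exponentation_calc exps (n - 1) f
      (r.1.insert n (2 * r.2), 2 * r.2)

-- one iteration of A's `for i, char in enumerate(input_string)` body; state = (exponentations, running_sum)
def calcStep (st : PySem.Dict Int Int × Int) (p : Int × Char) : PySem.Dict Int Int × Int :=
  if p.2 = 'O' then
    if st.1.contains p.1 = false then
      let r := memoized_exponentation_calc st.1 p.1 p.1.toNat
      (r.1.insert p.1 r.2, st.2 + r.2)
    else
      -- `exponentations[i]`: the key is present in this branch, so getD is exact
      (st.1, st.2 + st.1.getD p.1 0)
  else st

def calculate_val (input_string : String) : Int :=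
  -- input_string[::-1] (PySem.Str.slice?_none_none_neg_one: s[::-1] is the reverse)
  let rev := input_string.toList.reverse
  let fin := (PySem.List.enumerate rev 0).foldl calcStep (PySem.Dict.ofList [((0 : Int), (1 : Int))], 0)
  PySem.Int.mod fin.2 (10 ^ 9 + 7)

-- ===== PORT B =====
def calculate_val_alt (input_string : String) : Int :=
  if input_string.toList.isEmpty then 0
  else
    let bits := input_string.toList.map (fun c => if c = 'O' then '1' else '0')
    -- int(bits, 2): ported by hand as the base-2 Horner fold — exact here, since `bits`
    -- is a nonempty list of '0'/'1' digits only
    let v := bits.foldl (fun acc c => 2 * acc + (if c = '1' then (1 : Int) else 0)) 0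
    PySem.Int.mod v (10 ^ 9 + 7)

-- ===== PRECONDITION & SPEC =====
def Spec_calculate_val (input_string : String) (out : Int) : Prop := out = calculate_val_alt input_string
instance (input_string : String) (out : Int) : Decidable (Spec_calculate_val input_string out) := by unfold Spec_calculate_val; infer_instance

-- ===== CLAIM (what is proved, stated in full; the proofs are below) =====
def Claim_equal_calculate_val : Prop := ∀ (input_string : String), Dom_calculate_val input_string → Spec_calculate_val input_string (calculate_val input_string)

-- ===== LEMMAS AND PROOFS =====

-- sum of 2^position over the 'O' characters of a list, positions starting at s
def oSum : List Char → Nat → Int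
  | [], _ => 0
  | c :: t, s => (if c = 'O' then 2 ^ s else 0) + oSum t (s + 1)

-- invariant of A's memo dictionary: key 0 maps to 1, and every entry is (j, 2^j) with j ≥ 0
def DictInv (d : PySem.Dict Int Int) : Prop :=
  d.get? 0 = some 1 ∧ ∀ j v, d.get? j = some v → 0 ≤ j ∧ v = 2 ^ j.toNat

theorem dictInv_insert {d : PySem.Dict Int Int} (hd : DictInv d) (j : Int) (hj : 0 ≤ j) :
    DictInv (d.insert j (2 ^ j.toNat)) := by
  obtain ⟨h0, hall⟩ := hd
  constructor
  · by_cases h : (0 : Int) = j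
    · subst h; simp [PySem.Dict.get?_insert_self]
    · rw [PySem.Dict.get?_insert_of_ne _ _ h]; exact h0
  · intro k v hk
    by_cases h : k = j
    · subst h
      rw [PySem.Dict.get?_insert_self] at hk
      exact ⟨hj, by injection hk with h; omega⟩
    · rw [PySem.Dict.get?_insert_of_ne _ _ h] at hk
      exact hall k v hk

theorem memo_spec (fuel : Nat) :
    ∀ (d : PySem.Dict Int Int) (n : Int), DictInv d → 0 ≤ n → n.toNat ≤ fuel →
      (memoized_exponentation_calc d n fuel).2 = 2 ^ n.toNat ∧
      DictInv (memoized_exponentation_calc d n fuel).1 := by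
  induction fuel with
  | zero =>
    intro d n hd hn hf
    have hn0 : n = 0 := by omega
    subst hn0
    have h : memoized_exponentation_calc d 0 0 = (d, 1) := by
      simp [memoized_exponentation_calc, hd.1]
    rw [h]
    exact ⟨by simp, hd⟩
  | succ f ih =>
    intro d n hd hn hf
    unfold memoized_exponentation_calc
    cases hg : d.get? n with
    | some v => exact ⟨(hd.2 n v hg).2, hd⟩
    | none =>
      have hn0 : n ≠ 0 := by intro h; subst h; rw [hd.1] at hg; simp at hg
      obtain ⟨hv, hinv⟩ := ih d (n - 1) hd (by omega) (by omega)
      have hpow : (2 : Int) * 2 ^ (n - 1).toNat = 2 ^ n.toNat := by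
        have h : n.toNat = (n - 1).toNat + 1 := by omega
        rw [h, pow_succ]; ring
      refine ⟨?_, ?_⟩
      · show 2 * (memoized_exponentation_calc d (n - 1) f).2 = 2 ^ n.toNat
        rw [hv, hpow]
      · show DictInv ((memoized_exponentation_calc d (n - 1) f).1.insert n
            (2 * (memoized_exponentation_calc d (n - 1) f).2))
        rw [hv, hpow]
        exact dictInv_insert hinv n hn

theorem loop_spec (xs : List Char) :
    ∀ (k : Nat) (d : PySem.Dict Int Int) (s : Int), DictInv d →
      ((PySem.List.enumerate xs (k : Int)).foldl calcStep (d, s)).2 = s + oSum xs k := by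
  induction xs with
  | nil => intro k d s hd; simp [PySem.List.enumerate_nil, oSum]
  | cons c t ih =>
    intro k d s hd
    rw [PySem.List.enumerate_cons]
    have hcast : (k : Int) + 1 = ((k + 1 : Nat) : Int) := by push_cast; ring
    by_cases hc : c = 'O'
    · cases hcont : d.contains (k : Int) with
      | true =>
        -- key already present: its value is 2^k by the invariant
        have hsome : ∃ v, d.get? (k : Int) = some v := by
          have h := PySem.Dict.contains_eq_isSome_get? d (k : Int)
          rw [hcont] at h
          exact Option.isSome_iff_exists.mp h.symm
        obtain ⟨v, hv⟩ := hsome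
        have hval : v = 2 ^ k := by
          have h := (hd.2 _ _ hv).2; simpa using h
        have hgetD : d.getD (k : Int) 0 = 2 ^ k := by
          rw [PySem.Dict.getD_eq_get?_getD, hv, hval]; rfl
        have hstep : calcStep (d, s) ((k : Int), c) = (d, s + 2 ^ k) := by
          simp [calcStep, hc, hcont, hgetD]
        rw [List.foldl_cons, hstep, hcast, ih (k + 1) d (s + 2 ^ k) hd, oSum]
        simp [hc]; ring
      | false =>
        -- key absent: the memo helper computes 2^k and preserves the invariant
        obtain ⟨hv, hinv⟩ := memo_spec k d (k : Int) hd (by positivity) (by simp)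
        simp only [Int.toNat_natCast] at hv hinv
        have hstep : calcStep (d, s) ((k : Int), c)
            = ((memoized_exponentation_calc d (k : Int) k).1.insert (k : Int) (2 ^ k),
               s + 2 ^ k) := by
          simp [calcStep, hc, hcont, hv]
        have hins : DictInv ((memoized_exponentation_calc d (k : Int) k).1.insert (k : Int) (2 ^ k)) := by
          have h := dictInv_insert hinv (k : Int) (by positivity)
          simpa using h
        rw [List.foldl_cons, hstep, hcast, ih (k + 1) _ (s + 2 ^ k) hins, oSum]
        simp [hc]; ring
    · have hstep : calcStep (d, s) ((k : Int), c) = (d, s) := by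
        simp [calcStep, hc]
      rw [List.foldl_cons, hstep, hcast, ih (k + 1) d s hd, oSum]
      simp [hc]

theorem dictInv_init : DictInv (PySem.Dict.ofList [((0 : Int), (1 : Int))]) := by
  constructor
  · decide
  · intro j v h
    rw [show PySem.Dict.ofList [((0 : Int), (1 : Int))] = PySem.Dict.mk [((0 : Int), (1 : Int))] from rfl] at h
    rw [PySem.Dict.get?_mk_cons] at h
    by_cases hj : (0 : Int) == j
    · have : j = 0 := by simpa using (beq_iff_eq.mp hj).symm
      subst this
      simp at h
      refine ⟨le_refl 0, ?_⟩
      simp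
      omega
    · simp [hj] at h
      exact absurd h (by simp [PySem.Dict.get?])

theorem oSum_append (l : List Char) (c : Char) :
    ∀ s, oSum (l ++ [c]) s = oSum l s + (if c = 'O' then 2 ^ (s + l.length) else 0) := by
  induction l with
  | nil => intro s; simp [oSum]
  | cons x t ih =>
    intro s
    simp only [List.cons_append, oSum, ih (s + 1), List.length_cons]
    have : s + 1 + t.length = s + (t.length + 1) := by omega
    rw [this]; ring

theorem horner_eq_oSum (xs : List Char) :
    ∀ (a : Int),
      (xs.map (fun c => if c = 'O' then '1' else '0')).foldl
        (fun acc c => 2 * acc + (if c = '1' then (1 : Int) else 0)) a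
      = a * 2 ^ xs.length + oSum xs.reverse 0 := by
  induction xs with
  | nil => intro a; simp [oSum]
  | cons c t ih =>
    intro a
    simp only [List.map_cons, List.foldl_cons, List.reverse_cons, List.length_cons]
    rw [ih (2 * a + if (if c = 'O' then '1' else '0') = '1' then (1 : Int) else 0)]
    rw [oSum_append t.reverse c 0]
    have hbit : (if (if c = 'O' then '1' else '0') = '1' then (1 : Int) else 0)
        = (if c = 'O' then (1 : Int) else 0) := by
      by_cases hc : c = 'O' <;> simp [hc]
    rw [hbit, pow_succ]
    simp only [List.length_reverse, Nat.zero_add]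
    by_cases hc : c = 'O' <;> simp [hc] <;> ring

-- ===== VERDICT (by name: the statement is the Claim_ definition above) =====
theorem calculate_val_spec : Claim_equal_calculate_val := by
  intro s _
  unfold Spec_calculate_val calculate_val calculate_val_alt
  cases hs : s.toList with
  | nil =>
    simp [PySem.List.enumerate_nil]
  | cons c t =>
    rw [show (c :: t).isEmpty = false from rfl]
    simp only [Bool.false_eq_true, if_false]
    have hloop := loop_spec (c :: t).reverse 0 (PySem.Dict.ofList [((0 : Int), (1 : Int))]) 0 dictInv_init
    have hcast0 : ((0 : Nat) : Int) = 0 := rfl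
    rw [hcast0] at hloop
    rw [hloop, horner_eq_oSum (c :: t) 0]
    simp
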